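-- pv_equiv track=rewrite | github.com/Coderic/streamlink-gtk | src/streamlink_gtk/window.py | _sort_stream_keys
-- ===== SOURCE A (Python) =====
-- def _sort_stream_keys(keys: set[str]) -> list[str]:
--     ordered: list[str] = []
--     for special in ('best', 'worst'):
--         if special in keys:
--             ordered.append(special)
--     mid = sorted(k for k in keys if k not in ('best', 'worst'))
--     ordered.extend(sorted(mid, key=lambda x: x.lower()))
--     return ordered
-- ===== SOURCE B (Python) =====
-- def _sort_stream_keys(keys: set[str]) -> list[str]:
--     rank = {'best': 0, 'worst': 1}
--     return sorted(sorted(keys), key=lambda x: (rank.get(x, 2), x.lower()))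
-- ===== Notes on version B (the rewrite author's own statement) =====
-- stated objective: simpler
-- what changed: B drops A's partition (special-membership loop, filter, extend) and instead rank-sorts the whole set in one expression: a plain sort for the tie-break order followed by one stable sort under the composite key (rank 0/1/2 for best/worst/other, lowercased name).
import Mathlib
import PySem

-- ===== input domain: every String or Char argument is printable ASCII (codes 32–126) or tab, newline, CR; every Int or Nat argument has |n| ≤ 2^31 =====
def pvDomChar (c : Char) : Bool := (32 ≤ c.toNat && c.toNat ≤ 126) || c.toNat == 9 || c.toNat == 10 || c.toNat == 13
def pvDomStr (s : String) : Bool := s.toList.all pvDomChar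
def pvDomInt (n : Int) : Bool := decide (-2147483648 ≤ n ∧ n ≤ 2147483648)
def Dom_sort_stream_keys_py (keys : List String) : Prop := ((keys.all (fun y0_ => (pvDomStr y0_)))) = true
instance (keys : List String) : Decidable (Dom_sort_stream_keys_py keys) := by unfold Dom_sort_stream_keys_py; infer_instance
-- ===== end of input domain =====

-- B replaces A's partition (special-membership loop + filter + two-phase sort of the rest) by one
-- rank-keyed stable sort of the whole input; equal return value on every distinct-element list (simpler).

-- ===== PORT A =====
-- ordered = []; for special in ('best','worst'): if special in keys: ordered.append(special)
-- mid = sorted(k for k in keys if k not in ('best','worst')); ordered.extend(sorted(mid, key=lower))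
def sort_stream_keys_py (keys : List String) : List String :=
  let ordered : List String :=
    ["best", "worst"].foldl (fun acc special => if special ∈ keys then acc ++ [special] else acc) []
  let mid : List String :=
    PySem.List.sorted (keys.filter (fun k => !decide (k ∈ (["best", "worst"] : List String)))) (fun x => x) false
  ordered ++ PySem.List.sorted mid (fun x => PySem.Str.lower x) false

-- ===== PORT B =====
-- rank = {'best': 0, 'worst': 1}; return sorted(sorted(keys), key=lambda x: (rank.get(x, 2), x.lower()))
def sort_stream_keys_py_alt (keys : List String) : List String :=
  PySem.List.sorted2 (PySem.List.sorted keys (fun x => x) false)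
    (fun x => PySem.Dict.getD (PySem.Dict.ofList [("best", (0 : Int)), ("worst", 1)]) x 2)
    (fun x => PySem.Str.lower x) false

-- ===== PRECONDITION & SPEC =====
-- A's parameter is a Python set[str]; under the type convention its List String port holds DISTINCT
-- elements, so lists with duplicate elements correspond to no Python input and are excluded.
def Pre_sort_stream_keys_py (keys : List String) : Prop := keys.Nodup
instance (keys : List String) : Decidable (Pre_sort_stream_keys_py keys) := by
  unfold Pre_sort_stream_keys_py; infer_instance
def pvWitness_sort_stream_keys_py : List String := ["worst", "720p", "best", "1080P", "abc", "ABC"]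

def Spec_sort_stream_keys_py (keys : List String) (out : List String) : Prop := out = sort_stream_keys_py_alt keys
instance (keys : List String) (out : List String) : Decidable (Spec_sort_stream_keys_py keys out) := by unfold Spec_sort_stream_keys_py; infer_instance

-- ===== CLAIM (what is proved, stated in full; the proofs are below) =====
def Claim_equal_sort_stream_keys_py : Prop := ∀ (keys : List String), Dom_sort_stream_keys_py keys → Pre_sort_stream_keys_py keys → Spec_sort_stream_keys_py keys (sort_stream_keys_py keys)

-- ===== LEMMAS AND PROOFS =====

-- B's rank key and lowercase key (proof-side abbreviations, definitionally those of the ports).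
def pvRk (x : String) : Int :=
  PySem.Dict.getD (PySem.Dict.ofList [("best", (0 : Int)), ("worst", 1)]) x 2

def pvLw (x : String) : String := PySem.Str.lower x

-- B's sorted2 comparator.
def pvBef2 (a b : String) : Bool :=
  decide (pvRk a < pvRk b) || (!decide (pvRk b < pvRk a) && decide (pvLw a < pvLw b))

-- A's inner-sort comparator (key = lower).
def pvBef1 (a b : String) : Bool := decide (pvLw a < pvLw b)

-- The strict order in which a stable insertBy-sort under comparator `bef` emits a list whose
-- original order is strictly increasing in a secondary key k2: either `bef` orders the pair,
-- or `bef` ties them and the secondary key decides.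
def pvQ {α κ : Type} [LT κ] (bef : α → α → Bool) (k2 : α → κ) (a b : α) : Prop :=
  bef a b = true ∨ (bef a b = false ∧ bef b a = false ∧ k2 a < k2 b)

theorem pv_insertBy_pairwise {α κ : Type} [LinearOrder κ] (bef : α → α → Bool) (k2 : α → κ)
    (htrans : ∀ x y z, bef x y = true → pvQ bef k2 y z → pvQ bef k2 x z)
    (x : α) : ∀ (ys : List α), ys.Pairwise (pvQ bef k2) → (∀ y ∈ ys, k2 y < k2 x) →
    (PySem.List.insertBy bef x ys).Pairwise (pvQ bef k2) := by
  intro ys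
  induction ys with
  | nil => intro _ _; simp [PySem.List.insertBy]
  | cons y ys ih =>
    intro hp hlt
    rcases List.pairwise_cons.mp hp with ⟨hy, hp'⟩
    by_cases hxy : bef x y = true
    · rw [show PySem.List.insertBy bef x (y :: ys) = x :: y :: ys by
        simp [PySem.List.insertBy, hxy]]
      refine List.pairwise_cons.mpr ⟨?_, hp⟩
      intro z hz
      rcases List.mem_cons.mp hz with rfl | hz'
      · exact Or.inl hxy
      · exact htrans x y z hxy (hy z hz')
    · have hxy' : bef x y = false := by
        cases h : bef x y
        · rfl
        · exact absurd h hxy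
      rw [show PySem.List.insertBy bef x (y :: ys) = y :: PySem.List.insertBy bef x ys by
        simp [PySem.List.insertBy, hxy']]
      refine List.pairwise_cons.mpr ⟨?_, ih hp' (fun a ha => hlt a (List.mem_cons_of_mem _ ha))⟩
      intro z hz
      rcases (PySem.List.mem_insertBy bef x z ys).mp hz with rfl | hz'
      · by_cases hyx : bef y z = true
        · exact Or.inl hyx
        · have hyx' : bef y z = false := by
            cases h : bef y z
            · rfl
            · exact absurd h hyx
          exact Or.inr ⟨hyx', hxy', hlt y (List.mem_cons_self)⟩
      · exact hy z hz'

theorem pv_foldl_insertBy_pairwise {α κ : Type} [LinearOrder κ] (bef : α → α → Bool) (k2 : α → κ)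
    (htrans : ∀ x y z, bef x y = true → pvQ bef k2 y z → pvQ bef k2 x z) :
    ∀ (l acc : List α), acc.Pairwise (pvQ bef k2) →
      l.Pairwise (fun a b => k2 a < k2 b) → (∀ a ∈ acc, ∀ x ∈ l, k2 a < k2 x) →
      (l.foldl (fun acc x => PySem.List.insertBy bef x acc) acc).Pairwise (pvQ bef k2) := by
  intro l
  induction l with
  | nil => intro acc hacc _ _; simpa using hacc
  | cons x t ih =>
    intro acc hacc hl hcross
    rcases List.pairwise_cons.mp hl with ⟨hx, ht⟩
    simp only [List.foldl_cons]
    refine ih _ ?_ ht ?_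
    · exact pv_insertBy_pairwise bef k2 htrans x acc hacc
        (fun a ha => hcross a ha x List.mem_cons_self)
    · intro a ha x' hx'
      rcases (PySem.List.mem_insertBy bef x a acc).mp ha with rfl | ha'
      · exact hx x' hx'
      · exact hcross a ha' x' (List.mem_cons_of_mem _ hx')

theorem pvRk_best : pvRk "best" = 0 := by decide

theorem pvRk_worst : pvRk "worst" = 1 := by decide

theorem pvRk_other {x : String} (hb : x ≠ "best") (hw : x ≠ "worst") : pvRk x = 2 := by
  have h : PySem.Dict.ofList [("best", (0 : Int)), ("worst", 1)] =
      PySem.Dict.mk [("best", (0 : Int)), ("worst", 1)] := by decide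
  simp [pvRk, h, PySem.Dict.getD, PySem.Dict.get?, Ne.symm hb, Ne.symm hw]

theorem pv_bef2_iff (a b : String) :
    pvBef2 a b = true ↔ (pvRk a < pvRk b ∨ (pvRk a ≤ pvRk b ∧ pvLw a < pvLw b)) := by
  simp [pvBef2, not_lt]

theorem pv_bef2_false_iff (a b : String) :
    pvBef2 a b = false ↔ ¬(pvRk a < pvRk b ∨ (pvRk a ≤ pvRk b ∧ pvLw a < pvLw b)) := by
  rw [← pv_bef2_iff]
  cases pvBef2 a b <;> simp

theorem pv_bef2_htrans : ∀ x y z, pvBef2 x y = true → pvQ pvBef2 id y z → pvQ pvBef2 id x z := by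
  intro x y z hxy hQ
  rw [pv_bef2_iff] at hxy
  refine Or.inl ?_
  rw [pv_bef2_iff]
  rcases hQ with h | ⟨h1, h2, _⟩
  · rw [pv_bef2_iff] at h
    rcases hxy with h1 | ⟨h1, h1'⟩ <;> rcases h with h2 | ⟨h2, h2'⟩
    · exact Or.inl (lt_trans h1 h2)
    · exact Or.inl (lt_of_lt_of_le h1 h2)
    · exact Or.inl (lt_of_le_of_lt h1 h2)
    · exact Or.inr ⟨le_trans h1 h2, lt_trans h1' h2'⟩
  · rw [pv_bef2_false_iff] at h1 h2
    push Not at h1 h2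
    have hr : pvRk y = pvRk z := le_antisymm h2.1 h1.1
    have hl : pvLw y = pvLw z := le_antisymm (h2.2 h1.1) (h1.2 h2.1)
    rcases hxy with h | ⟨h, h'⟩
    · exact Or.inl (by rw [← hr]; exact h)
    · exact Or.inr ⟨by rw [← hr]; exact h, by rw [← hl]; exact h'⟩

theorem pv_bef2_asymm (a b : String) (h : pvBef2 a b = true) : pvBef2 b a = false := by
  rw [pv_bef2_iff] at h
  rw [pv_bef2_false_iff]
  push Not
  rcases h with h | ⟨h, h'⟩
  · exact ⟨le_of_lt h, fun hba => absurd hba (not_le.mpr h)⟩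
  · exact ⟨h, fun _ => le_of_lt h'⟩

theorem pv_Q_antisymm {α κ : Type} [LinearOrder κ] (bef : α → α → Bool) (k2 : α → κ)
    (hasym : ∀ a b, bef a b = true → bef b a = false)
    (a b : α) (h1 : pvQ bef k2 a b) (h2 : pvQ bef k2 b a) : a = b := by
  exfalso
  rcases h1 with h1 | ⟨h1a, h1b, h1c⟩ <;> rcases h2 with h2 | ⟨h2a, h2b, h2c⟩
  · rw [hasym a b h1] at h2; exact Bool.false_ne_true h2
  · rw [h1] at h2b; simp at h2b
  · rw [h2] at h1b; simp at h1b
  · exact lt_asymm h1c h2c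

theorem pv_key_htrans {α κ₁ κ₂ : Type} [LinearOrder κ₁] [LinearOrder κ₂]
    (key : α → κ₁) (k2 : α → κ₂) :
    ∀ x y z, (fun a b => decide (key a < key b)) x y = true →
      pvQ (fun a b => decide (key a < key b)) k2 y z →
      pvQ (fun a b => decide (key a < key b)) k2 x z := by
  intro x y z hxy hQ
  simp only [decide_eq_true_eq] at hxy
  refine Or.inl ?_
  simp only [decide_eq_true_eq]
  rcases hQ with h | ⟨h1, h2, _⟩
  · simp only [decide_eq_true_eq] at h
    exact lt_trans hxy h
  · simp only [decide_eq_false_iff_not, not_lt] at h1 h2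
    exact lt_of_lt_of_le hxy h2

-- strictness of a plain `sorted` output on a duplicate-free list
theorem pv_sorted_id_strict (l : List String) (h : l.Nodup) :
    (PySem.List.sorted l (fun x => x) false).Pairwise (fun a b : String => a < b) := by
  have hp := PySem.List.sorted_pairwise l (fun x => x)
  have hnd : (PySem.List.sorted l (fun x => x) false).Nodup :=
    ((PySem.List.sorted_perm l (fun x => x) false).nodup_iff).mpr h
  exact (hp.and hnd).imp (fun hab => lt_of_le_of_ne hab.1 hab.2)

-- elements of A's middle block are neither 'best' nor 'worst', so their rank is 2
theorem pv_mem_S_rk {keys : List String} {a : String}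
    (ha : a ∈ PySem.List.sorted
      (PySem.List.sorted (keys.filter (fun k => !decide (k ∈ (["best", "worst"] : List String)))) (fun x => x) false)
      (fun x => PySem.Str.lower x) false) : pvRk a = 2 := by
  rw [PySem.List.mem_sorted, PySem.List.mem_sorted] at ha
  have := (List.mem_filter.mp ha).2
  simp only [Bool.not_eq_true', decide_eq_false_iff_not, List.mem_cons, List.not_mem_nil] at this
  push Not at this
  exact pvRk_other this.1 this.2.1

-- within the rank-2 block, the (lower, plain) strict order implies B's strict order
theorem pv_Q1_to_Q2 {a b : String} (ha : pvRk a = 2) (hb : pvRk b = 2)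
    (h : pvQ pvBef1 id a b) : pvQ pvBef2 id a b := by
  rcases h with h | ⟨h1, h2, h3⟩
  · simp only [pvBef1, decide_eq_true_eq] at h
    exact Or.inl ((pv_bef2_iff a b).mpr (Or.inr ⟨by rw [ha, hb], h⟩))
  · simp only [pvBef1, decide_eq_false_iff_not, not_lt] at h1 h2
    have hl : pvLw a = pvLw b := le_antisymm h2 h1
    refine Or.inr ⟨?_, ?_, h3⟩
    · rw [pv_bef2_false_iff]; push Not
      rw [ha, hb, hl]
      exact ⟨le_refl _, fun _ => le_refl _⟩
    · rw [pv_bef2_false_iff]; push Not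
      rw [ha, hb, hl]
      exact ⟨le_refl _, fun _ => le_refl _⟩

-- A's output is pairwise-increasing in B's strict order
theorem pv_A_pairwise (keys : List String) (h : keys.Nodup) :
    (sort_stream_keys_py keys).Pairwise (pvQ pvBef2 id) := by
  show (List.Pairwise (pvQ pvBef2 id)
    ((["best", "worst"].foldl (fun acc special => if special ∈ keys then acc ++ [special] else acc) []) ++
      PySem.List.sorted
        (PySem.List.sorted (keys.filter (fun k => !decide (k ∈ (["best", "worst"] : List String)))) (fun x => x) false)
        (fun x => PySem.Str.lower x) false))
  have hSQ : (PySem.List.sorted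
      (PySem.List.sorted (keys.filter (fun k => !decide (k ∈ (["best", "worst"] : List String)))) (fun x => x) false)
      (fun x => PySem.Str.lower x) false).Pairwise (pvQ pvBef2 id) := by
    have hstrict := pv_sorted_id_strict (keys.filter (fun k => !decide (k ∈ (["best", "worst"] : List String))))
      (h.filter _)
    have h1 : (PySem.List.sorted
        (PySem.List.sorted (keys.filter (fun k => !decide (k ∈ (["best", "worst"] : List String)))) (fun x => x) false)
        (fun x => PySem.Str.lower x) false).Pairwise (pvQ pvBef1 id) := by
      rw [PySem.List.sorted_eq_foldl_insertBy]
      exact pv_foldl_insertBy_pairwise _ id (pv_key_htrans (fun x => PySem.Str.lower x) id) _ []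
        List.Pairwise.nil hstrict (by simp)
    exact h1.imp_of_mem (fun ha hb hq => pv_Q1_to_Q2 (pv_mem_S_rk ha) (pv_mem_S_rk hb) hq)
  rw [List.pairwise_append]
  refine ⟨?_, hSQ, ?_⟩
  · by_cases hb : "best" ∈ keys <;> by_cases hw : "worst" ∈ keys <;>
      simp [List.foldl, hb, hw, List.pairwise_cons]
    exact Or.inl (by decide : pvBef2 "best" "worst" = true)
  · intro a ha b hbS
    have hrb : pvRk b = 2 := pv_mem_S_rk hbS
    have hra : pvRk a = 0 ∨ pvRk a = 1 := by
      by_cases hb : "best" ∈ keys <;> by_cases hw : "worst" ∈ keys <;>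
        simp [List.foldl, hb, hw, List.mem_cons] at ha <;> rcases ha with rfl | rfl <;>
        first
          | exact Or.inl pvRk_best
          | exact Or.inr pvRk_worst
    refine Or.inl ((pv_bef2_iff a b).mpr (Or.inl ?_))
    rw [hrb]
    rcases hra with h0 | h1 <;> omega

-- B's output is pairwise-increasing in the same order
theorem pv_B_pairwise (keys : List String) (h : keys.Nodup) :
    (sort_stream_keys_py_alt keys).Pairwise (pvQ pvBef2 id) := by
  have hdef : sort_stream_keys_py_alt keys =
      (PySem.List.sorted keys (fun x => x) false).foldl
        (fun acc x => PySem.List.insertBy pvBef2 x acc) [] := rfl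
  rw [hdef]
  exact pv_foldl_insertBy_pairwise pvBef2 id pv_bef2_htrans _ []
    List.Pairwise.nil (pv_sorted_id_strict keys h) (by simp)

theorem pv_A_perm (keys : List String) (h : keys.Nodup) :
    (sort_stream_keys_py keys).Perm keys := by
  show (List.Perm
    ((["best", "worst"].foldl (fun acc special => if special ∈ keys then acc ++ [special] else acc) []) ++
      PySem.List.sorted
        (PySem.List.sorted (keys.filter (fun k => !decide (k ∈ (["best", "worst"] : List String)))) (fun x => x) false)
        (fun x => PySem.Str.lower x) false) keys)
  have hS : (PySem.List.sorted
      (PySem.List.sorted (keys.filter (fun k => !decide (k ∈ (["best", "worst"] : List String)))) (fun x => x) false)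
      (fun x => PySem.Str.lower x) false).Perm
      (keys.filter (fun k => !decide (k ∈ (["best", "worst"] : List String)))) :=
    (PySem.List.sorted_perm _ _ false).trans (PySem.List.sorted_perm _ _ false)
  -- the two special one-element filters
  have hcnt : ∀ a : String, a ∈ keys → keys.count a = 1 := by
    intro a ha
    have h1 := List.nodup_iff_count_le_one.mp h a
    have h2 : 0 < keys.count a := List.count_pos_iff.mpr ha
    omega
  have hfb : keys.filter (fun x => x == "best") = if "best" ∈ keys then ["best"] else [] := by
    rw [List.filter_beq]
    by_cases hb : "best" ∈ keys
    · rw [hcnt _ hb]; simp [hb]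
    · rw [List.count_eq_zero.mpr hb]; simp [hb]
  have hfw : keys.filter (fun x => x == "worst") = if "worst" ∈ keys then ["worst"] else [] := by
    rw [List.filter_beq]
    by_cases hw : "worst" ∈ keys
    · rw [hcnt _ hw]; simp [hw]
    · rw [List.count_eq_zero.mpr hw]; simp [hw]
  -- peel off 'best', then 'worst'
  have p1 : (keys.filter (fun x => x == "best") ++ keys.filter (fun x => !(x == "best"))).Perm keys :=
    List.filter_append_perm _ keys
  have p2 : ((keys.filter (fun x => !(x == "best"))).filter (fun x => x == "worst") ++
      (keys.filter (fun x => !(x == "best"))).filter (fun x => !(x == "worst"))).Perm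
      (keys.filter (fun x => !(x == "best"))) :=
    List.filter_append_perm _ _
  have e1 : (keys.filter (fun x => !(x == "best"))).filter (fun x => x == "worst") =
      keys.filter (fun x => x == "worst") := by
    rw [List.filter_filter]
    refine List.filter_congr ?_
    intro x _
    by_cases hx : x = "worst" <;> simp [hx]
  have e2 : (keys.filter (fun x => !(x == "best"))).filter (fun x => !(x == "worst")) =
      keys.filter (fun k => !decide (k ∈ (["best", "worst"] : List String))) := by
    rw [List.filter_filter]
    refine List.filter_congr ?_
    intro x _
    by_cases h1 : x = "best" <;> by_cases h2 : x = "worst" <;> simp [h1, h2]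
  have hmain : ((keys.filter (fun x => x == "best") ++ keys.filter (fun x => x == "worst")) ++
      keys.filter (fun k => !decide (k ∈ (["best", "worst"] : List String)))).Perm keys := by
    rw [List.append_assoc]
    refine List.Perm.trans ?_ p1
    refine List.Perm.append_left _ ?_
    rw [← e1, ← e2]
    exact p2
  have hord : (["best", "worst"].foldl (fun acc special => if special ∈ keys then acc ++ [special] else acc) []) =
      keys.filter (fun x => x == "best") ++ keys.filter (fun x => x == "worst") := by
    rw [hfb, hfw]
    by_cases hb : "best" ∈ keys <;> by_cases hw : "worst" ∈ keys <;> simp [List.foldl, hb, hw]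
  rw [hord]
  exact (List.Perm.append_left _ hS).trans hmain

theorem pv_B_perm (keys : List String) : (sort_stream_keys_py_alt keys).Perm keys :=
  (PySem.List.sorted2_perm _ _ _ false).trans (PySem.List.sorted_perm _ _ false)

-- ===== VERDICT (by name: the statement is the Claim_ definition above) =====
theorem sort_stream_keys_py_spec : Claim_equal_sort_stream_keys_py := by
  intro keys _ hpre
  unfold Spec_sort_stream_keys_py
  exact List.Perm.eq_of_pairwise
    (fun a b _ _ h1 h2 => pv_Q_antisymm pvBef2 id pv_bef2_asymm a b h1 h2)
    (pv_A_pairwise keys hpre) (pv_B_pairwise keys hpre)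
    ((pv_A_perm keys hpre).trans (pv_B_perm keys).symm)
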